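-- pv_equiv track=rewrite | github.com/abayojosephdesire/ClassProjects | snekoban/recipes/lab.py | combined_flat_recipes
-- ===== SOURCE A (Python) =====
-- def combined_flat_recipes(flat_recipes):
--     """
--     Given a list of lists of dictionaries, where each inner list represents all
--     the flat recipes for a certain ingredient, compute and return a list of flat
--     recipe dictionaries that represent all the possible combinations of
--     ingredient recipes.
--     """
--
--     def helper(recipes):  # Simply avoids mutations
--         if not recipes:  # Base case
--             return [{}]
--
--         first_recipe, other_recipes = recipes[0], recipes[1:]
--         combined_recipes = []
--         for first_ingr in first_recipe:  # Recursive case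
--             for other_ingr in helper(other_recipes):
--                 combined_recipes.append(
--                     {
--                         key: first_ingr.get(key, 0) + other_ingr.get(key, 0)
--                         for key in set(first_ingr) | set(other_ingr)
--                     }
--                 )
--         return combined_recipes
--
--     return helper(flat_recipes)
-- ===== SOURCE B (Python) =====
-- def combined_flat_recipes(flat_recipes):
--     """
--     Iterative right-to-left fold: the product of the remaining levels is
--     built once per level, then combined with that level's recipes.
--     """
--     def merge(a, b):
--         return {k: a.get(k, 0) + b.get(k, 0) for k in set(a) | set(b)}
--
--     acc = [{}]
--     for recipes in reversed(flat_recipes):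
--         acc = [merge(r, t) for r in recipes for t in acc]
--     return acc
-- ===== Notes on version B (the rewrite author's own statement) =====
-- stated objective: simpler
-- what changed: Replaces A's recursion (which recomputes the whole tail product inside the loop over the first ingredient's recipes) by a short iterative right-to-left fold that builds each level's product exactly once.
import Mathlib
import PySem

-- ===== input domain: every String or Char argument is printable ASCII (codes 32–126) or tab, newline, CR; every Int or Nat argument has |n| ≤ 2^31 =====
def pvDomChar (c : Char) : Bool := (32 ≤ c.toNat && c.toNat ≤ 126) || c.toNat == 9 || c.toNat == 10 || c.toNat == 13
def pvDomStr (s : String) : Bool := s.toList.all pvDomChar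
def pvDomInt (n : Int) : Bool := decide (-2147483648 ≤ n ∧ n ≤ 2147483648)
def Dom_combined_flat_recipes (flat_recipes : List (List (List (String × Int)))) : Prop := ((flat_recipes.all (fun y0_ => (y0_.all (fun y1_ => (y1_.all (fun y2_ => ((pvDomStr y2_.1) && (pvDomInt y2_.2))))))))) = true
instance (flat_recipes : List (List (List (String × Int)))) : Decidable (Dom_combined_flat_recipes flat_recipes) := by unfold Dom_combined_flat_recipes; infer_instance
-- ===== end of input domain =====

-- ===== PORT A =====
-- B is a short iterative right-to-left fold building each level's product once, instead of A's
-- recursion that recomputes the tail product inside the first-recipe loop (objective: simpler).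
-- Dict lookup a.get(key, 0); result-dict key iteration follows set(first)|set(other) (hash order
-- not modelled; dict outputs are order-insensitive).
def pvLookA (d : List (String × Int)) (k : String) : Int :=
  PySem.Dict.getD (PySem.Dict.mk d) k 0

-- {key: f.get(key,0) + o.get(key,0) for key in set(f) | set(o)}
def pvMergeA (f o : List (String × Int)) : List (String × Int) :=
  (PySem.Set.union (PySem.Set.ofList (f.map Prod.fst)) (o.map Prod.fst)).map
    (fun k => (k, pvLookA f k + pvLookA o k))

-- helper(recipes): base case [{}]; else nested loops appending merged dicts
def pvHelperA : List (List (List (String × Int))) → List (List (String × Int))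
  | [] => [[]]
  | first :: rest =>
    first.foldl (fun acc f =>
      (pvHelperA rest).foldl (fun acc2 o => acc2 ++ [pvMergeA f o]) acc) []

def combined_flat_recipes (flat_recipes : List (List (List (String × Int)))) : List (List (String × Int)) :=
  pvHelperA flat_recipes

-- ===== PORT B =====
def pvLookB (d : List (String × Int)) (k : String) : Int :=
  PySem.Dict.getD (PySem.Dict.mk d) k 0

def pvMergeB (a b : List (String × Int)) : List (String × Int) :=
  (PySem.Set.union (PySem.Set.ofList (a.map Prod.fst)) (b.map Prod.fst)).map
    (fun k => (k, pvLookB a k + pvLookB b k))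

-- acc = [{}]; for recipes in reversed(flat_recipes): acc = [merge(r,t) for r in recipes for t in acc]
def combined_flat_recipes_alt (flat_recipes : List (List (List (String × Int)))) : List (List (String × Int)) :=
  flat_recipes.reverse.foldl
    (fun acc recipes => recipes.flatMap (fun r => acc.map (fun t => pvMergeB r t))) [[]]

-- ===== PRECONDITION & SPEC =====
def Spec_combined_flat_recipes (flat_recipes : List (List (List (String × Int)))) (out : List (List (String × Int))) : Prop := out = combined_flat_recipes_alt flat_recipes
instance (flat_recipes : List (List (List (String × Int)))) (out : List (List (String × Int))) : Decidable (Spec_combined_flat_recipes flat_recipes out) := by unfold Spec_combined_flat_recipes; infer_instance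

-- ===== CLAIM (what is proved, stated in full; the proofs are below) =====
def Claim_equal_combined_flat_recipes : Prop := ∀ (flat_recipes : List (List (List (String × Int)))), Dom_combined_flat_recipes flat_recipes → Spec_combined_flat_recipes flat_recipes (combined_flat_recipes flat_recipes)

-- ===== LEMMAS AND PROOFS =====
theorem pvMerge_eq : pvMergeA = pvMergeB := rfl

theorem pvHelperA_eq (l : List (List (List (String × Int)))) :
    pvHelperA l = l.foldr (fun recipes acc => recipes.flatMap (fun r => acc.map (fun t => pvMergeA r t))) [[]] := by
  induction l with
  | nil => rfl
  | cons first rest ih =>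
    simp only [pvHelperA, List.foldr_cons, ← ih]
    simp only [PySem.List.foldl_append_singleton_eq_map]
    rw [PySem.List.foldl_append_eq_flatMap, List.nil_append]


-- ===== VERDICT (by name: the statement is the Claim_ definition above) =====
theorem combined_flat_recipes_spec : Claim_equal_combined_flat_recipes := by
  intro fr _
  unfold Spec_combined_flat_recipes combined_flat_recipes combined_flat_recipes_alt
  rw [List.foldl_reverse, pvHelperA_eq, ← pvMerge_eq]
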